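-- pv_equiv track=rewrite | github.com/anupamkr2307/Smart-irrigation | Smart-Irrigation-main/app.py | get_climate_zone
-- ===== SOURCE A (Python) =====
-- def get_climate_zone(city_or_state):
--     climate_zones = {
--         "Himalayan": ["Jammu & Kashmir", "Ladakh", "Himachal Pradesh", "Uttarakhand", "Arunachal Pradesh", "Sikkim"],
--         "Temperate": ["Punjab", "Haryana", "Delhi", "Uttar Pradesh", "Bihar", "West Bengal", "Jharkhand"],
--         "Semi-Arid": ["Rajasthan", "Gujarat", "Madhya Pradesh", "Maharashtra", "Karnataka", "Telangana", "Chhattisgarh"],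
--         "Arid": ["Western Rajasthan", "Kutch (Gujarat)"],
--         "Tropical Wet": ["Kerala", "Tamil Nadu", "Goa", "Assam", "Meghalaya", "Tripura", "Nagaland", "Mizoram", "Manipur", "Odisha", "Andhra Pradesh", "West Bengal"]
--     }
--     union_territories = {
--         "Andaman & Nicobar Islands": "Tropical Wet",
--         "Lakshadweep": "Tropical Wet",
--         "Chandigarh": "Temperate",
--         "Dadra & Nagar Haveli and Daman & Diu": "Tropical Wet",
--         "Puducherry": "Tropical Wet"
--     }
--     for zone, states in climate_zones.items():
--         if city_or_state in states:
--             return zone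
--     return union_territories.get(city_or_state, "Unknown")
-- ===== SOURCE B (Python) =====
-- def get_climate_zone(city_or_state):
--     climate_zones = {
--         "Himalayan": ["Jammu & Kashmir", "Ladakh", "Himachal Pradesh", "Uttarakhand", "Arunachal Pradesh", "Sikkim"],
--         "Temperate": ["Punjab", "Haryana", "Delhi", "Uttar Pradesh", "Bihar", "West Bengal", "Jharkhand"],
--         "Semi-Arid": ["Rajasthan", "Gujarat", "Madhya Pradesh", "Maharashtra", "Karnataka", "Telangana", "Chhattisgarh"],
--         "Arid": ["Western Rajasthan", "Kutch (Gujarat)"],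
--         "Tropical Wet": ["Kerala", "Tamil Nadu", "Goa", "Assam", "Meghalaya", "Tripura", "Nagaland", "Mizoram", "Manipur", "Odisha", "Andhra Pradesh", "West Bengal"]
--     }
--     union_territories = {
--         "Andaman & Nicobar Islands": "Tropical Wet",
--         "Lakshadweep": "Tropical Wet",
--         "Chandigarh": "Temperate",
--         "Dadra & Nagar Haveli and Daman & Diu": "Tropical Wet",
--         "Puducherry": "Tropical Wet"
--     }
--     # flatten into (name, zone) pairs: first zone wins for the duplicate "West Bengal"
--     pairs = []
--     seen = set()
--     for zone, states in climate_zones.items():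
--         for st in states:
--             if st not in seen:
--                 seen.add(st)
--                 pairs.append((st, zone))
--     for ut, zone in union_territories.items():
--         pairs.append((ut, zone))
--     pairs.sort(key=lambda p: p[0])
--     # binary search for city_or_state among the sorted names
--     lo, hi = 0, len(pairs)
--     while lo < hi:
--         mid = (lo + hi) // 2
--         if pairs[mid][0] < city_or_state:
--             lo = mid + 1
--         else:
--             hi = mid
--     if lo < len(pairs) and pairs[lo][0] == city_or_state:
--         return pairs[lo][1]
--     return "Unknown"
-- ===== Notes on version B (the rewrite author's own statement) =====
-- stated objective: alternative
-- what changed: B flattens the zone tables into one deduplicated (name, zone) pair list (first zone wins, keeping the duplicate 'West Bengal' as Temperate), sorts it by name, and answers with a hand-written binary search instead of A's sequential membership scans over the five zone lists plus a dict fallback.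
import Mathlib
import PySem

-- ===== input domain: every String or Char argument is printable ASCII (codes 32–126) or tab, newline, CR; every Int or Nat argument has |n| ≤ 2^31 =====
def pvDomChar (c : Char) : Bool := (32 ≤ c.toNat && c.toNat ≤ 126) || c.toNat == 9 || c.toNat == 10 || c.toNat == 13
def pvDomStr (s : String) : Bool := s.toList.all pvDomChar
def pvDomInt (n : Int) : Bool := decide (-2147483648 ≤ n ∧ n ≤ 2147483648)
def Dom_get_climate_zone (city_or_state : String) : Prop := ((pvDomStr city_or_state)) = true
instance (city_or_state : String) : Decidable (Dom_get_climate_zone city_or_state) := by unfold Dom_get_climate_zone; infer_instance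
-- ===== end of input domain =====

-- B flattens the zone tables into one deduplicated (name, zone) list, sorts it by name, and answers with a binary search instead of A's sequential membership scans; objective: alternative.

-- ===== PORT A =====
def pvZonesA : List (String × List String) := [("Himalayan", ["Jammu & Kashmir", "Ladakh", "Himachal Pradesh", "Uttarakhand", "Arunachal Pradesh", "Sikkim"]), ("Temperate", ["Punjab", "Haryana", "Delhi", "Uttar Pradesh", "Bihar", "West Bengal", "Jharkhand"]), ("Semi-Arid", ["Rajasthan", "Gujarat", "Madhya Pradesh", "Maharashtra", "Karnataka", "Telangana", "Chhattisgarh"]), ("Arid", ["Western Rajasthan", "Kutch (Gujarat)"]), ("Tropical Wet", ["Kerala", "Tamil Nadu", "Goa", "Assam", "Meghalaya", "Tripura", "Nagaland", "Mizoram", "Manipur", "Odisha", "Andhra Pradesh", "West Bengal"])]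
def pvUTA : PySem.Dict String String := PySem.Dict.ofList [("Andaman & Nicobar Islands", "Tropical Wet"), ("Lakshadweep", "Tropical Wet"), ("Chandigarh", "Temperate"), ("Dadra & Nagar Haveli and Daman & Diu", "Tropical Wet"), ("Puducherry", "Tropical Wet")]
-- the for-loop with early return over climate_zones.items()
def pvLoopA (city_or_state : String) : List (String × List String) → String
  | [] => PySem.Dict.getD pvUTA city_or_state "Unknown"
  | (zone, states) :: rest =>
      if states.contains city_or_state then zone else pvLoopA city_or_state rest
def get_climate_zone (city_or_state : String) : String := pvLoopA city_or_state pvZonesA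

-- ===== PORT B =====
def pvZonesB : List (String × List String) := [("Himalayan", ["Jammu & Kashmir", "Ladakh", "Himachal Pradesh", "Uttarakhand", "Arunachal Pradesh", "Sikkim"]), ("Temperate", ["Punjab", "Haryana", "Delhi", "Uttar Pradesh", "Bihar", "West Bengal", "Jharkhand"]), ("Semi-Arid", ["Rajasthan", "Gujarat", "Madhya Pradesh", "Maharashtra", "Karnataka", "Telangana", "Chhattisgarh"]), ("Arid", ["Western Rajasthan", "Kutch (Gujarat)"]), ("Tropical Wet", ["Kerala", "Tamil Nadu", "Goa", "Assam", "Meghalaya", "Tripura", "Nagaland", "Mizoram", "Manipur", "Odisha", "Andhra Pradesh", "West Bengal"])]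
def pvUTpairsB : List (String × String) := [("Andaman & Nicobar Islands", "Tropical Wet"), ("Lakshadweep", "Tropical Wet"), ("Chandigarh", "Temperate"), ("Dadra & Nagar Haveli and Daman & Diu", "Tropical Wet"), ("Puducherry", "Tropical Wet")]
-- flatten into (name, zone) pairs with a 'seen' set (first zone wins), append the UTs, sort by name
def pvPairsB : List (String × String) :=
  let flat := pvZonesB.foldl (fun acc zs =>
      zs.2.foldl (fun acc st =>
        if PySem.Set.contains acc.1 st then acc
        else (acc.1.add st, acc.2 ++ [(st, zs.1)])) acc)
    ((PySem.Set.empty : PySem.Set String), ([] : List (String × String)))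
  PySem.List.sorted (flat.2 ++ pvUTpairsB) (fun p => p.1.toList) false  -- Python's str '<' is code-point lex = List Char '<' (names are ASCII)
-- the while lo < hi binary-search loop; lo and hi stay in [0, pairs.length] so plain Nat getD is pairs[mid];
-- the fuel argument (hi - lo ≤ fuel, here pairs.length) only makes the same computation total/kernel-reducible
def pvLoopB (pairs : List (String × String)) (s : String) : Nat → Nat → Nat → Nat
  | 0, lo, _ => lo
  | fuel + 1, lo, hi =>
    if lo < hi then
      let mid := (lo + hi) / 2
      if (pairs.getD mid ("", "")).1.toList < s.toList then pvLoopB pairs s fuel (mid + 1) hi  -- str '<' as List Char '<'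
      else pvLoopB pairs s fuel lo mid
    else lo
def get_climate_zone_alt (city_or_state : String) : String :=
  let pairs := pvPairsB
  let lo := pvLoopB pairs city_or_state pairs.length 0 pairs.length
  if lo < pairs.length ∧ (pairs.getD lo ("", "")).1 = city_or_state then (pairs.getD lo ("", "")).2
  else "Unknown"

-- ===== PRECONDITION & SPEC =====
def Spec_get_climate_zone (city_or_state : String) (out : String) : Prop := out = get_climate_zone_alt city_or_state
instance (city_or_state : String) (out : String) : Decidable (Spec_get_climate_zone city_or_state out) := by unfold Spec_get_climate_zone; infer_instance

-- ===== CLAIM (what is proved, stated in full; the proofs are below) =====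
def Claim_equal_get_climate_zone : Prop := ∀ (city_or_state : String), Dom_get_climate_zone city_or_state → Spec_get_climate_zone city_or_state (get_climate_zone city_or_state)

-- ===== LEMMAS AND PROOFS =====
set_option maxRecDepth 40000 in
theorem pvPairsB_eval : pvPairsB = [("Andaman & Nicobar Islands", "Tropical Wet"), ("Andhra Pradesh", "Tropical Wet"), ("Arunachal Pradesh", "Himalayan"), ("Assam", "Tropical Wet"), ("Bihar", "Temperate"), ("Chandigarh", "Temperate"), ("Chhattisgarh", "Semi-Arid"), ("Dadra & Nagar Haveli and Daman & Diu", "Tropical Wet"), ("Delhi", "Temperate"), ("Goa", "Tropical Wet"), ("Gujarat", "Semi-Arid"), ("Haryana", "Temperate"), ("Himachal Pradesh", "Himalayan"), ("Jammu & Kashmir", "Himalayan"), ("Jharkhand", "Temperate"), ("Karnataka", "Semi-Arid"), ("Kerala", "Tropical Wet"), ("Kutch (Gujarat)", "Arid"), ("Ladakh", "Himalayan"), ("Lakshadweep", "Tropical Wet"), ("Madhya Pradesh", "Semi-Arid"), ("Maharashtra", "Semi-Arid"), ("Manipur", "Tropical Wet"), ("Meghalaya", "Tropical Wet"), ("Mizoram",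 "Tropical Wet"), ("Nagaland", "Tropical Wet"), ("Odisha", "Tropical Wet"), ("Puducherry", "Tropical Wet"), ("Punjab", "Temperate"), ("Rajasthan", "Semi-Arid"), ("Sikkim", "Himalayan"), ("Tamil Nadu", "Tropical Wet"), ("Telangana", "Semi-Arid"), ("Tripura", "Tropical Wet"), ("Uttar Pradesh", "Temperate"), ("Uttarakhand", "Himalayan"), ("West Bengal", "Temperate"), ("Western Rajasthan", "Arid")] := by decide

set_option maxRecDepth 40000 in
set_option maxHeartbeats 4000000 in
theorem pv_agree (city_or_state : String) :
    get_climate_zone city_or_state = get_climate_zone_alt city_or_state := by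
  by_cases h0 : city_or_state = "Jammu & Kashmir"
  · subst h0; decide
  by_cases h1 : city_or_state = "Ladakh"
  · subst h1; decide
  by_cases h2 : city_or_state = "Himachal Pradesh"
  · subst h2; decide
  by_cases h3 : city_or_state = "Uttarakhand"
  · subst h3; decide
  by_cases h4 : city_or_state = "Arunachal Pradesh"
  · subst h4; decide
  by_cases h5 : city_or_state = "Sikkim"
  · subst h5; decide
  by_cases h6 : city_or_state = "Punjab"
  · subst h6; decide
  by_cases h7 : city_or_state = "Haryana"
  · subst h7; decide
  by_cases h8 : city_or_state = "Delhi"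
  · subst h8; decide
  by_cases h9 : city_or_state = "Uttar Pradesh"
  · subst h9; decide
  by_cases h10 : city_or_state = "Bihar"
  · subst h10; decide
  by_cases h11 : city_or_state = "West Bengal"
  · subst h11; decide
  by_cases h12 : city_or_state = "Jharkhand"
  · subst h12; decide
  by_cases h13 : city_or_state = "Rajasthan"
  · subst h13; decide
  by_cases h14 : city_or_state = "Gujarat"
  · subst h14; decide
  by_cases h15 : city_or_state = "Madhya Pradesh"
  · subst h15; decide
  by_cases h16 : city_or_state = "Maharashtra"
  · subst h16; decide
  by_cases h17 : city_or_state = "Karnataka"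
  · subst h17; decide
  by_cases h18 : city_or_state = "Telangana"
  · subst h18; decide
  by_cases h19 : city_or_state = "Chhattisgarh"
  · subst h19; decide
  by_cases h20 : city_or_state = "Western Rajasthan"
  · subst h20; decide
  by_cases h21 : city_or_state = "Kutch (Gujarat)"
  · subst h21; decide
  by_cases h22 : city_or_state = "Kerala"
  · subst h22; decide
  by_cases h23 : city_or_state = "Tamil Nadu"
  · subst h23; decide
  by_cases h24 : city_or_state = "Goa"
  · subst h24; decide
  by_cases h25 : city_or_state = "Assam"
  · subst h25; decide
  by_cases h26 : city_or_state = "Meghalaya"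
  · subst h26; decide
  by_cases h27 : city_or_state = "Tripura"
  · subst h27; decide
  by_cases h28 : city_or_state = "Nagaland"
  · subst h28; decide
  by_cases h29 : city_or_state = "Mizoram"
  · subst h29; decide
  by_cases h30 : city_or_state = "Manipur"
  · subst h30; decide
  by_cases h31 : city_or_state = "Odisha"
  · subst h31; decide
  by_cases h32 : city_or_state = "Andhra Pradesh"
  · subst h32; decide
  by_cases h33 : city_or_state = "Andaman & Nicobar Islands"
  · subst h33; decide
  by_cases h34 : city_or_state = "Lakshadweep"
  · subst h34; decide
  by_cases h35 : city_or_state = "Chandigarh"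
  · subst h35; decide
  by_cases h36 : city_or_state = "Dadra & Nagar Haveli and Daman & Diu"
  · subst h36; decide
  by_cases h37 : city_or_state = "Puducherry"
  · subst h37; decide
  -- s is none of the 38 names: both sides return "Unknown"
  have g33 := Ne.symm h33
  have g34 := Ne.symm h34
  have g35 := Ne.symm h35
  have g36 := Ne.symm h36
  have g37 := Ne.symm h37
  have hUT : pvUTA = PySem.Dict.mk [("Andaman & Nicobar Islands", "Tropical Wet"), ("Lakshadweep", "Tropical Wet"), ("Chandigarh", "Temperate"), ("Dadra & Nagar Haveli and Daman & Diu", "Tropical Wet"), ("Puducherry", "Tropical Wet")] := by decide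
  have hA : get_climate_zone city_or_state = "Unknown" := by
    simp [get_climate_zone, pvLoopA, pvZonesA, hUT, PySem.Dict.getD, PySem.Dict.get?, h0, h1, h2, h3, h4, h5, h6, h7, h8, h9, h10, h11, h12, h13, h14, h15, h16, h17, h18, h19, h20, h21, h22, h23, h24, h25, h26, h27, h28, h29, h30, h31, h32, g33, g34, g35, g36, g37]
  have hB : get_climate_zone_alt city_or_state = "Unknown" := by
    have hr : ∀ (r : Nat),
        (if r < pvPairsB.length ∧ (pvPairsB.getD r ("", "")).1 = city_or_state
         then (pvPairsB.getD r ("", "")).2 else "Unknown") = "Unknown" := by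
      intro r
      rw [if_neg]
      rintro ⟨hlt, hkey⟩
      have hmem : city_or_state ∈ pvPairsB.map Prod.fst := by
        rw [← hkey]
        exact List.mem_map_of_mem (List.getD_eq_getElem _ _ hlt ▸ pvPairsB.getElem_mem hlt)
      rw [pvPairsB_eval] at hmem
      simp only [List.map, List.mem_cons, List.not_mem_nil, or_false] at hmem
      simp [h0, h1, h2, h3, h4, h5, h6, h7, h8, h9, h10, h11, h12, h13, h14, h15, h16, h17, h18, h19, h20, h21, h22, h23, h24, h25, h26, h27, h28, h29, h30, h31, h32, h33, h34, h35, h36, h37] at hmem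
    exact hr (pvLoopB pvPairsB city_or_state pvPairsB.length 0 pvPairsB.length)
  rw [hA, hB]

-- ===== VERDICT (by name: the statement is the Claim_ definition above) =====
theorem get_climate_zone_spec : Claim_equal_get_climate_zone := by
  intro s _
  unfold Spec_get_climate_zone
  exact pv_agree s
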